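-- pv_equiv track=rewrite | github.com/kester2000/number_comb | board.py | get_line_potential
-- ===== SOURCE A (Python) =====
-- def get_line_potential(score_list: list) -> int:
--     # 得到一行潜力，score_list为该行
--
--     # num为得到第一个非癞子非空
--     num = -1
--     for i in score_list:
--         if i != -1 and i != 0:
--             num = i
--             break
--
--     if num == -1:
--         return 10
--
--     # 转化所有癞子
--     change_list = [num if x == -1 else x for x in score_list]
--
--     # 全部相同则得分
--     if all(x == num for x in change_list):
--         return num
--
--     return 0
-- ===== SOURCE B (Python) =====
-- def get_line_potential(score_list: list) -> int:
--     # Set-algebra reformulation: classify the row by its distinct non-wildcard values.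
--     distinct = {x for x in score_list if x != -1}
--     if distinct <= {0}:           # empty row or only empty cells (plus wildcards)
--         return 10
--     if len(distinct) == 1:        # one real token value fills the row
--         return next(iter(distinct))
--     return 0
-- ===== Notes on version B (the rewrite author's own statement) =====
-- stated objective: simpler
-- what changed: Replaces the first-nonzero search loop, the wildcard-substitution list rebuild and the all()-equality scan with one set comprehension over the row followed by set algebra (subset-of-{0} test, cardinality test).
import Mathlib
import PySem

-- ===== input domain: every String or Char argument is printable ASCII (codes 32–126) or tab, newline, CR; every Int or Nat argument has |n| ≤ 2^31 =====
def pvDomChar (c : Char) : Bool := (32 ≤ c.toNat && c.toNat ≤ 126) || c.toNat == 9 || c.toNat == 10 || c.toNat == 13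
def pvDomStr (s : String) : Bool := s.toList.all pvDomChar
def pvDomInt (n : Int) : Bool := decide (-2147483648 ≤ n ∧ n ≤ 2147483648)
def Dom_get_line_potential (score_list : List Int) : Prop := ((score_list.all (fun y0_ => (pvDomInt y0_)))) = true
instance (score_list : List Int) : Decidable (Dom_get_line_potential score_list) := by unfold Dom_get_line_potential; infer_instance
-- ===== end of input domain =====

-- B replaces A's search loop + list rebuild + all() scan by set algebra over the row's distinct non-wildcard values (objective: simpler).


-- ===== PORT A =====
-- Python 'for i in score_list: if i != -1 and i != 0: num = i; break' with num initialised to -1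
def firstNonWild : List Int → Int
  | [] => -1
  | i :: rest => if i ≠ -1 ∧ i ≠ 0 then i else firstNonWild rest

def get_line_potential (score_list : List Int) : Int :=
  let num := firstNonWild score_list
  if num = -1 then 10
  else
    let change_list := score_list.map (fun x => if x = -1 then num else x)
    if change_list.all (fun x => x = num) then num else 0

-- ===== PORT B =====
def get_line_potential_alt (score_list : List Int) : Int :=
  let distinct : PySem.Set Int := PySem.Set.ofList (score_list.filter (fun x => x ≠ -1))
  if PySem.Set.issubset distinct (PySem.Set.ofList [0]) then 10
  else if PySem.Set.len distinct = 1 then distinct.headD 0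
  else 0

-- ===== PRECONDITION & SPEC =====
def Spec_get_line_potential (score_list : List Int) (out : Int) : Prop := out = get_line_potential_alt score_list
instance (score_list : List Int) (out : Int) : Decidable (Spec_get_line_potential score_list out) := by unfold Spec_get_line_potential; infer_instance

-- ===== CLAIM (what is proved, stated in full; the proofs are below) =====
def Claim_equal_get_line_potential : Prop := ∀ (score_list : List Int), Dom_get_line_potential score_list → Spec_get_line_potential score_list (get_line_potential score_list)

-- ===== LEMMAS AND PROOFS =====

-- if the loop finds nothing, every element is -1 or 0
theorem firstNonWild_eq_neg_one {sl : List Int} (h : firstNonWild sl = -1) :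
    ∀ x ∈ sl, x = -1 ∨ x = 0 := by
  induction sl with
  | nil => intro x hx; cases hx
  | cons a t ih =>
    intro x hx
    by_cases ha : a ≠ -1 ∧ a ≠ 0
    · simp [firstNonWild, ha] at h
    · rcases List.mem_cons.1 hx with rfl | hx
      · by_cases h1 : x = -1
        · exact Or.inl h1
        · refine Or.inr ?_
          by_contra h0
          exact ha ⟨h1, h0⟩
      · exact ih (by simpa [firstNonWild, ha] using h) x hx

-- if the loop finds something, the result is a non-wild member of the list
theorem firstNonWild_mem {sl : List Int} (h : firstNonWild sl ≠ -1) :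
    firstNonWild sl ∈ sl ∧ firstNonWild sl ≠ -1 ∧ firstNonWild sl ≠ 0 := by
  induction sl with
  | nil => simp [firstNonWild] at h
  | cons a t ih =>
    by_cases ha : a ≠ -1 ∧ a ≠ 0
    · refine ⟨?_, ?_, ?_⟩ <;> simp [firstNonWild, ha]
    · have h' : firstNonWild t ≠ -1 := by simpa [firstNonWild, ha] using h
      have := ih h'
      simp only [firstNonWild, if_neg ha]
      exact ⟨List.mem_cons_of_mem _ this.1, this.2⟩

theorem mem_ofList_filter {sl : List Int} {x : Int} :
    x ∈ PySem.Set.ofList (sl.filter (fun y => y ≠ -1)) ↔ x ∈ sl ∧ x ≠ -1 := by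
  simp [PySem.Set.mem_ofList, List.mem_filter]

theorem issubset_zero_iff {sl : List Int} :
    PySem.Set.issubset (PySem.Set.ofList (sl.filter (fun y => y ≠ -1))) (PySem.Set.ofList [0]) = true
      ↔ ∀ x ∈ sl, x = -1 ∨ x = 0 := by
  constructor
  · intro h x hx
    by_cases hw : x = -1
    · exact Or.inl hw
    · right
      have hmem : x ∈ PySem.Set.ofList (sl.filter (fun y => y ≠ -1)) :=
        mem_ofList_filter.2 ⟨hx, hw⟩
      have h' := List.all_eq_true.1 h x hmem
      have h0 : PySem.Set.ofList ([0] : List Int) = [0] := by decide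
      rw [h0] at h'
      simpa [PySem.Set.contains] using h'
  · intro h
    simp only [PySem.Set.issubset, List.all_eq_true]
    intro x hx
    have := mem_ofList_filter.1 hx
    have := h x this.1
    have hx0 : x = 0 := by
      rcases ‹x = -1 ∨ x = 0› with h1 | h1
      · exact absurd h1 (mem_ofList_filter.1 hx).2
      · exact h1
    subst hx0
    simp [PySem.Set.contains, PySem.Set.ofList, PySem.Set.add]

-- ===== VERDICT (by name: the statement is the Claim_ definition above) =====
theorem get_line_potential_spec : Claim_equal_get_line_potential := by
  intro sl _
  unfold Spec_get_line_potential get_line_potential get_line_potential_alt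
  by_cases hnum : firstNonWild sl = -1
  · -- A returns 10; every element is -1 or 0, so distinct ⊆ {0}
    have hall := firstNonWild_eq_neg_one hnum
    rw [if_pos hnum, if_pos (issubset_zero_iff.2 hall)]
  · rcases firstNonWild_mem hnum with ⟨hmem, hne1, hne0⟩
    set num := firstNonWild sl with hdef
    have hnsub : ¬ (PySem.Set.issubset (PySem.Set.ofList (sl.filter (fun y => y ≠ -1))) (PySem.Set.ofList [0]) = true) := by
      intro h
      rcases issubset_zero_iff.1 h num hmem with h1 | h1 <;> [exact hne1 h1; exact hne0 h1]
    rw [if_neg hnum, if_neg hnsub]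
    by_cases hone : ∀ x ∈ sl, x = -1 ∨ x = num
    · -- all cells are wildcards or num : A returns num, distinct = [num]
      have hfilter : sl.filter (fun y => y ≠ -1) = List.replicate ((sl.filter (fun y => y ≠ -1)).length) num := by
        apply List.eq_replicate_of_mem
        intro x hx
        have := List.mem_filter.1 hx
        rcases hone x this.1 with h1 | h1
        · exact absurd h1 (by simpa using this.2)
        · exact h1
      have hlen : 0 < (sl.filter (fun y => y ≠ -1)).length :=
        List.length_pos_of_mem (List.mem_filter.2 ⟨hmem, by simpa using hne1⟩)
      have hdistinct : PySem.Set.ofList (sl.filter (fun y => y ≠ -1)) = [num] := by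
        rw [hfilter]
        obtain ⟨k, hk⟩ : ∃ k, (sl.filter (fun y => y ≠ -1)).length = k + 1 :=
          ⟨(sl.filter (fun y => y ≠ -1)).length - 1, by omega⟩
        rw [hk]
        have hstep : ∀ (m : ℕ) (s : PySem.Set Int), PySem.Set.contains s num = true →
            List.foldl PySem.Set.add s (List.replicate m num) = s := by
          intro m
          induction m with
          | zero => intro s _; simp
          | succ p ihp =>
            intro s hs
            rw [List.replicate_succ, List.foldl_cons]
            have hadd : PySem.Set.add s num = s := by
              unfold PySem.Set.add
              rw [hs]
              simp
            rw [hadd]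
            exact ihp s hs
        have h0 : PySem.Set.ofList (List.replicate (k + 1) num) =
            List.foldl PySem.Set.add (PySem.Set.add PySem.Set.empty num) (List.replicate k num) := by
          rw [List.replicate_succ]; rfl
        have h1 : PySem.Set.add PySem.Set.empty num = [num] := by
          simp [PySem.Set.add, PySem.Set.empty, PySem.Set.contains]
        rw [h0, h1]
        exact hstep k [num] (by simp [PySem.Set.contains])
      have hA : (sl.map (fun x => if x = -1 then num else x)).all (fun x => decide (x = num)) = true := by
        simp only [List.all_map, List.all_eq_true, Function.comp]
        intro x hx
        rcases hone x hx with h1 | h1 <;> simp [h1]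
      rw [if_pos hA, hdistinct]
      simp [PySem.Set.len]
    · -- some real cell differs from num : A returns 0, distinct has ≥ 2 elements
      rw [not_forall] at hone
      obtain ⟨y, hy⟩ := hone
      rw [Classical.not_imp, not_or] at hy
      obtain ⟨hy, hy1, hy2⟩ := hy
      have hA : ¬ ((sl.map (fun x => if x = -1 then num else x)).all (fun x => decide (x = num)) = true) := by
        simp only [List.all_map, List.all_eq_true, Function.comp]
        intro h
        have := h y hy
        simp [hy1] at this
        exact hy2 this
      rw [if_neg hA]
      have hymem : y ∈ PySem.Set.ofList (sl.filter (fun z => z ≠ -1)) := mem_ofList_filter.2 ⟨hy, hy1⟩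
      have hnmem : num ∈ PySem.Set.ofList (sl.filter (fun z => z ≠ -1)) := mem_ofList_filter.2 ⟨hmem, hne1⟩
      have hlen2 : ¬ (PySem.Set.len (PySem.Set.ofList (sl.filter (fun z => z ≠ -1))) = 1) := by
        intro h
        have hlen : (PySem.Set.ofList (sl.filter (fun z => z ≠ -1))).length = 1 := by
          simp only [PySem.Set.len] at h
          exact_mod_cast h
        obtain ⟨a, ha⟩ := List.length_eq_one_iff.1 hlen
        rw [ha] at hymem hnmem
        simp at hymem hnmem
        exact hy2 (hymem.trans hnmem.symm)
      rw [if_neg hlen2]
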